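-- pv_equiv track=rewrite | github.com/powert1p/kodi-web | backend/core/diagnostic.py | _reconstruct_levels
-- ===== SOURCE A (Python) =====
-- def _reconstruct_levels(answers: list[list]) -> list[int]:
--     """Reconstruct the sub_difficulty sequence from answer history.
--
--     State-machine transition table (top-down with recovery):
--       Q1: L3 (always)
--         correct → Q2: L4
--         wrong   → Q2: L1
--       Q2 after L3-correct: L4 → STOP
--       Q2 after L3-wrong: L1
--         wrong  → STOP
--         correct → Q3: L2
--       Q3: L2
--         wrong  → STOP
--         correct → Q4: L3 (retry)
--       Q4: L3 (retry)
--         wrong  → STOP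
--         correct → Q5: L4 → STOP
--
--     Returns list of levels for each answer, e.g. [3, 1, 2, 3, 4].
--     """
--     if not answers:
--         return []
--
--     levels = [3]  # Q1 is always L3
--     for i in range(1, len(answers)):
--         prev_level = levels[i - 1]
--         prev_correct = answers[i - 1][0]
--
--         if prev_level == 3 and i == 1:
--             # After first L3
--             levels.append(4 if prev_correct else 1)
--         elif prev_level == 4:
--             break  # L4 is always terminal
--         elif prev_level == 1:
--             if prev_correct:
--                 levels.append(2)  # L1 ok → L2
--             else:
--                 break  # L1 fail → STOP
--         elif prev_level == 2:
--             if prev_correct: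
--                 levels.append(3)  # L2 ok → L3 retry
--             else:
--                 break  # L2 fail → STOP
--         elif prev_level == 3 and i > 1:
--             # L3 retry
--             if prev_correct:
--                 levels.append(4)  # L3 retry ok → L4
--             else:
--                 break  # L3 retry fail → STOP
--         else:
--             break
--
--     return levels
-- ===== SOURCE B (Python) =====
-- # Closed-form rebuild: the emitted levels are always a prefix of one of two
-- # fixed paths ([3,4] if the first answer was correct, else [3,1,2,3,4]);
-- # extend along the path while the preceding answer was correct, truncate to
-- # len(answers).
-- def _reconstruct_levels(answers: list[list]) -> list[int]:
--     n = len(answers)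
--     if n == 0:
--         return []
--     if n == 1:
--         return [3]
--     path = [3, 4] if answers[0][0] else [3, 1, 2, 3, 4]
--     m = 2
--     while m < min(len(path), n) and answers[m - 1][0]:
--         m += 1
--     return path[:min(m, n)]
-- ===== Notes on version B (the rewrite author's own statement) =====
-- stated objective: simpler
-- what changed: Replaces A's branch-on-previous-level state-machine loop by the closed-form observation that the output is a prefix of one of two fixed level paths ([3,4] or [3,1,2,3,4]) chosen by the first answer and extended while answers stay correct, truncated to len(answers).
import Mathlib
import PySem

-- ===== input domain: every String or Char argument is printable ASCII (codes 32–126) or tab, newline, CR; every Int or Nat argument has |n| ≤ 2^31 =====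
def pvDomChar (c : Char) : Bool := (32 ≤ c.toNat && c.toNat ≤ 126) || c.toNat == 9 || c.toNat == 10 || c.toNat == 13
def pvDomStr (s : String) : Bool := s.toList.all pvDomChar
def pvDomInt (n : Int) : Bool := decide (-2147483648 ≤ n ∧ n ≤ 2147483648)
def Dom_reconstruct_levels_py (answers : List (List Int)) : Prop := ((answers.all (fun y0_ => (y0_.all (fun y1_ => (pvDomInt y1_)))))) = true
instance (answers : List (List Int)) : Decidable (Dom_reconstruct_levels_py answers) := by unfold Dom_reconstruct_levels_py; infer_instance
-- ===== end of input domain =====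

-- B replaces A's branch-on-previous-level loop by the closed observation that the
-- output is a correctness-driven prefix of one of two fixed paths (objective: simpler).

-- ===== PORT A =====
-- the for-loop of A: i runs from 1 while i < len(answers), `break` = return levels.
-- answers[i-1][0]: the inner [0] can raise IndexError in Python; `none` marks that
-- (those inputs are excluded by Pre_ below; the value returned there is irrelevant).
def pvALoop (answers : List (List Int)) (i : Nat) (levels : List Int) : List Int :=
  if _h : i < answers.length then
    let prev_level := levels.getD (i - 1) 0
    match PySem.List.pyGet? (answers.getD (i - 1) []) 0 with
    | none => levels
    | some prev_correct =>
      if prev_level = 3 ∧ i = 1 then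
        pvALoop answers (i + 1) (levels ++ [if prev_correct ≠ 0 then 4 else 1])
      else if prev_level = 4 then levels
      else if prev_level = 1 then
        if prev_correct ≠ 0 then pvALoop answers (i + 1) (levels ++ [2]) else levels
      else if prev_level = 2 then
        if prev_correct ≠ 0 then pvALoop answers (i + 1) (levels ++ [3]) else levels
      else if prev_level = 3 ∧ 1 < i then
        if prev_correct ≠ 0 then pvALoop answers (i + 1) (levels ++ [4]) else levels
      else levels
  else levels
termination_by answers.length - i

def reconstruct_levels_py (answers : List (List Int)) : List Int :=
  if answers.isEmpty then [] else pvALoop answers 1 [3]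

-- ===== PORT B =====
-- Source B's while loop: extend m while m < min(len(path), n) and answers[m-1][0] is truthy.
def pvBExtend (answers : List (List Int)) (pathLen : Nat) (m : Nat) : Nat :=
  if _h : m < min pathLen answers.length then
    if ((PySem.List.pyGet? (answers.getD (m - 1) []) 0).getD 0) ≠ 0 then
      pvBExtend answers pathLen (m + 1)
    else m
  else m
termination_by min pathLen answers.length - m

def reconstruct_levels_py_alt (answers : List (List Int)) : List Int :=
  let n := answers.length
  if n = 0 then []
  else if n = 1 then [3]
  else
    let path : List Int :=
      if ((PySem.List.pyGet? (answers.getD 0 []) 0).getD 0) ≠ 0 then [3, 4]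
      else [3, 1, 2, 3, 4]
    let m := pvBExtend answers path.length 2
    path.take (min m n)   -- path[:min(m,n)] on a nonnegative bound = take

-- ===== PRECONDITION & SPEC =====
-- entry j exists and is nonempty / its first element is truthy
def pvNE (answers : List (List Int)) (j : Nat) : Bool :=
  decide (j < answers.length) && !(answers.getD j []).isEmpty
def pvC (answers : List (List Int)) (j : Nat) : Bool := (answers.getD j []).headD 0 != 0
-- Pre_ = exactly the inputs on which A returns: every history entry A's (bounded, at most
-- five-step) protocol actually inspects must be nonempty; on the others A raises IndexError.
def Pre_reconstruct_levels_py (answers : List (List Int)) : Prop :=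
  (let n := answers.length
   if n ≤ 1 then true
   else if !pvNE answers 0 then false
   else if pvC answers 0 then decide (n ≤ 2) || pvNE answers 1
   else if n ≤ 2 then true
   else if !pvNE answers 1 then false
   else if !pvC answers 1 then true
   else if n ≤ 3 then true
   else if !pvNE answers 2 then false
   else if !pvC answers 2 then true
   else if n ≤ 4 then true
   else if !pvNE answers 3 then false
   else if !pvC answers 3 then true
   else decide (n ≤ 5) || pvNE answers 4) = true
instance (answers : List (List Int)) : Decidable (Pre_reconstruct_levels_py answers) := by
  unfold Pre_reconstruct_levels_py; infer_instance

def pvWitness_reconstruct_levels_py : List (List Int) := [[0], [1], [0]]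

def Spec_reconstruct_levels_py (answers : List (List Int)) (out : List Int) : Prop := out = reconstruct_levels_py_alt answers
instance (answers : List (List Int)) (out : List Int) : Decidable (Spec_reconstruct_levels_py answers out) := by unfold Spec_reconstruct_levels_py; infer_instance

-- ===== CLAIM (what is proved, stated in full; the proofs are below) =====
def Claim_equal_reconstruct_levels_py : Prop := ∀ (answers : List (List Int)), Dom_reconstruct_levels_py answers → Pre_reconstruct_levels_py answers → Spec_reconstruct_levels_py answers (reconstruct_levels_py answers)

-- ===== LEMMAS AND PROOFS =====

-- once the last emitted level is 4 the A-loop stops (whatever it reads there)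
lemma pvALoop_lvl4 (answers : List (List Int)) (i : Nat) (levels : List Int)
    (h4 : levels.getD (i - 1) 0 = 4) :
    pvALoop answers i levels = levels := by
  rw [pvALoop]
  split
  · rename_i h
    simp only [h4]
    cases PySem.List.pyGet? (answers.getD (i - 1) []) 0 <;> simp
  · rfl

lemma pvBExtend_stop (answers : List (List Int)) (pathLen m : Nat)
    (h : ¬ m < min pathLen answers.length) :
    pvBExtend answers pathLen m = m := by
  rw [pvBExtend, dif_neg h]

theorem pv_main (answers : List (List Int))
    (hp : Pre_reconstruct_levels_py answers) :
    reconstruct_levels_py answers = reconstruct_levels_py_alt answers := by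
  rcases answers with _ | ⟨a0, _ | ⟨a1, rest⟩⟩
  · rfl
  · simp [reconstruct_levels_py, reconstruct_levels_py_alt, pvALoop]
  · rcases a0 with _ | ⟨x, a0t⟩
    · exfalso
      simp [Pre_reconstruct_levels_py, pvNE] at hp
    · by_cases hx : x = 0
      · rcases rest with _ | ⟨a2, rest2⟩
        · simp [reconstruct_levels_py, reconstruct_levels_py_alt, pvALoop, PySem.List.pyGet?,
              PySem.List.pyIdx?, pvBExtend_stop, hx]
        · rcases a1 with _ | ⟨y, a1t⟩
          · exfalso
            simp [Pre_reconstruct_levels_py, pvNE, pvC, hx] at hp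
          · by_cases hy : y = 0
            · simp [reconstruct_levels_py, reconstruct_levels_py_alt, pvALoop, pvBExtend, PySem.List.pyGet?,
              PySem.List.pyIdx?, hx, hy]
            · rcases rest2 with _ | ⟨a3, rest3⟩
              · simp [reconstruct_levels_py, reconstruct_levels_py_alt, pvALoop, pvBExtend, PySem.List.pyGet?,
              PySem.List.pyIdx?, pvBExtend_stop, hx, hy]
              · rcases a2 with _ | ⟨z, a2t⟩
                · exfalso
                  simp [Pre_reconstruct_levels_py, pvNE, pvC, hx, hy] at hp
                  omega
                · by_cases hz : z = 0
                  · simp [reconstruct_levels_py, reconstruct_levels_py_alt, pvALoop, pvBExtend, PySem.List.pyGet?,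
              PySem.List.pyIdx?, hx, hy, hz]
                  · rcases rest3 with _ | ⟨a4, rest4⟩
                    · simp [reconstruct_levels_py, reconstruct_levels_py_alt, pvALoop, pvBExtend, PySem.List.pyGet?,
              PySem.List.pyIdx?, pvBExtend_stop, hx, hy, hz]
                    · rcases a3 with _ | ⟨w, a3t⟩
                      · exfalso
                        simp [Pre_reconstruct_levels_py, pvNE, pvC, hx, hy, hz] at hp
                        omega
                      · by_cases hw : w = 0
                        · simp [reconstruct_levels_py, reconstruct_levels_py_alt, pvALoop, pvBExtend, PySem.List.pyGet?,
              PySem.List.pyIdx?, hx, hy, hz, hw]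
                        · simp [reconstruct_levels_py, reconstruct_levels_py_alt, pvALoop, pvBExtend, PySem.List.pyGet?,
              PySem.List.pyIdx?, pvBExtend_stop, pvALoop_lvl4, hx, hy, hz, hw]
      · -- c0 truthy: both sides give [3,4]
        simp [reconstruct_levels_py, reconstruct_levels_py_alt, pvALoop, PySem.List.pyGet?,
              PySem.List.pyIdx?, hx, pvBExtend_stop, pvALoop_lvl4]

-- ===== VERDICT (by name: the statement is the Claim_ definition above) =====
theorem reconstruct_levels_py_spec : Claim_equal_reconstruct_levels_py := by
  intro answers _ hp
  unfold Spec_reconstruct_levels_py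
  exact pv_main answers hp
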